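-- pv_equiv track=rewrite | github.com/jaimeRodriguezg/Algoritmos | Tarea2/Pregunta2/pregunta2.py | suma_maximos_subarreglos
-- ===== SOURCE A (Python) =====
-- def suma_maximos_subarreglos(arreglo,resultado):
--     if(len(arreglo)==1):
--         return arreglo[0]
--     else:
--         inicio=0
--         fin=len(arreglo)-1
--         pos_max=arreglo.index(max(arreglo))
--         resultado = resultado + arreglo[pos_max]*(fin-pos_max+1)*(pos_max-inicio+1)
--         if pos_max==inicio:
--             resultado= resultado + suma_maximos_subarreglos(arreglo[pos_max+1:],0)
--         elif pos_max==fin: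
--             resultado= resultado + suma_maximos_subarreglos(arreglo[:pos_max],0)
--         else:
--             resultado = resultado + suma_maximos_subarreglos(arreglo[:pos_max],0)+suma_maximos_subarreglos(arreglo[pos_max+1:],0)
--         return resultado
-- ===== SOURCE B (Python) =====
-- def suma_maximos_subarreglos(arreglo, resultado):
--     total = resultado
--     suffix = arreglo
--     while suffix:
--         m = suffix[0]
--         for x in suffix:
--             if x > m:
--                 m = x
--             total += m
--         suffix = suffix[1:]
--     return total
-- ===== Notes on version B (the rewrite author's own statement) =====
-- stated objective: alternative
-- what changed: Replaced the divide-and-conquer recursion on the position of the maximum (with list slicing) by a direct iterative double loop that sums running maxima over every suffix, with the accumulator parameter added uniformly.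
-- intended difference: On single-element arrays with resultado != 0, A returns arreglo[0] and silently drops the accumulator resultado, while B returns resultado + arreglo[0]; B's value is intended because on every longer array A itself adds resultado to the sum of subarray maxima. — e.g. on suma_maximos_subarreglos([5], 3): A returns 5, B returns 8
import Mathlib
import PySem

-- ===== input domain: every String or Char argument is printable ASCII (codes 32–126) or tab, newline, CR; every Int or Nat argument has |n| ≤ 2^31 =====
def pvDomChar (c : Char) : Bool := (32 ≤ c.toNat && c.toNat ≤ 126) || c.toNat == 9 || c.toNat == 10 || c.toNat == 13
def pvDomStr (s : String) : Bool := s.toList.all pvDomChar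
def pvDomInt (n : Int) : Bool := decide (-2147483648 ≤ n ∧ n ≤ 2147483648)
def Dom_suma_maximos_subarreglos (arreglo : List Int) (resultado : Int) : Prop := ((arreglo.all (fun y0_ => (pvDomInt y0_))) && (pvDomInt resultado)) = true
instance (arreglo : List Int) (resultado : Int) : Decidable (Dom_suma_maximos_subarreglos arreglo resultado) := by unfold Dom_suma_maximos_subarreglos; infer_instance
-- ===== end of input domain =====

-- B replaces A's divide-and-conquer recursion on the maximum's position by an iterative
-- double loop summing running maxima over every suffix (alternative algorithm, not faster).

-- ===== PORT A =====
-- literal transliteration of A's divide-and-conquer recursion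
def suma_maximos_subarreglos (arreglo : List Int) (resultado : Int) : Int :=
  if arreglo.length = 1 then
    (PySem.List.pyGet? arreglo 0).getD 0
  else
    match _hmx : PySem.List.max? arreglo (fun y => y) with
    | none => 0  -- max([]) raises ValueError; excluded by Pre_
    | some mx =>
      match _hpos : PySem.List.index? arreglo mx with
      | none => 0  -- unreachable: mx ∈ arreglo
      | some pos_max =>
        let inicio : Int := 0
        let fin : Int := (arreglo.length : Int) - 1
        let resultado := resultado +
          (PySem.List.pyGet? arreglo (pos_max : Int)).getD 0 * (fin - (pos_max : Int) + 1) * ((pos_max : Int) - inicio + 1)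
        if (pos_max : Int) = inicio then
          resultado + suma_maximos_subarreglos (PySem.List.slice arreglo (some ((pos_max : Int) + 1)) none) 0
        else if (pos_max : Int) = fin then
          resultado + suma_maximos_subarreglos (PySem.List.slice arreglo none (some (pos_max : Int))) 0
        else
          resultado + suma_maximos_subarreglos (PySem.List.slice arreglo none (some (pos_max : Int))) 0
            + suma_maximos_subarreglos (PySem.List.slice arreglo (some ((pos_max : Int) + 1)) none) 0
termination_by arreglo.length
decreasing_by
  · obtain ⟨hk, -, -⟩ := PySem.List.getElem_of_index?_eq_some _hpos
    rw [show ((pos_max : Int) + 1) = (((pos_max + 1 : Nat)) : Int) by push_cast; ring,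
        PySem.List.slice_from_natCast]
    simp only [List.length_drop]; omega
  · obtain ⟨hk, -, -⟩ := PySem.List.getElem_of_index?_eq_some _hpos
    rw [PySem.List.slice_to_natCast]
    simp only [List.length_take]; omega
  · obtain ⟨hk, -, -⟩ := PySem.List.getElem_of_index?_eq_some _hpos
    rw [PySem.List.slice_to_natCast]
    simp only [List.length_take]; omega
  · obtain ⟨hk, -, -⟩ := PySem.List.getElem_of_index?_eq_some _hpos
    rw [show ((pos_max : Int) + 1) = (((pos_max + 1 : Nat)) : Int) by push_cast; ring,
        PySem.List.slice_from_natCast]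
    simp only [List.length_drop]; omega

-- ===== PORT B =====
-- inner 'for x in suffix' loop: m running maximum, total accumulator
def pvRow : Int → List Int → Int → Int
  | _, [], total => total
  | m, x :: rest, total =>
      let m' := if x > m then x else m
      pvRow m' rest (total + m')

-- outer 'while suffix' loop
def pvGo : List Int → Int → Int
  | [], total => total
  | x :: rest, total => pvGo rest (pvRow x (x :: rest) total)

def suma_maximos_subarreglos_alt (arreglo : List Int) (resultado : Int) : Int :=
  pvGo arreglo resultado

-- ===== PRECONDITION & SPEC =====
-- Pre_ excludes only the empty list, on which A raises ValueError (max of an empty sequence).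
def Pre_suma_maximos_subarreglos (arreglo : List Int) (resultado : Int) : Prop :=
  arreglo ≠ []
instance (arreglo : List Int) (resultado : Int) : Decidable (Pre_suma_maximos_subarreglos arreglo resultado) := by
  unfold Pre_suma_maximos_subarreglos; infer_instance

def pvWitness_suma_maximos_subarreglos : List Int × Int := ([3, 1, 2], 0)

-- On single-element arrays with resultado ≠ 0, A returns arreglo[0] and silently drops the
-- accumulator resultado, while B returns resultado + arreglo[0]; B's value is intended because
-- on every longer array A itself adds resultado to the sum of subarray maxima.
def D_suma_maximos_subarreglos (arreglo : List Int) (resultado : Int) : Prop :=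
  arreglo.length = 1 ∧ resultado ≠ 0
instance (arreglo : List Int) (resultado : Int) : Decidable (D_suma_maximos_subarreglos arreglo resultado) := by
  unfold D_suma_maximos_subarreglos; infer_instance

def Spec_suma_maximos_subarreglos (arreglo : List Int) (resultado : Int) (out : Int) : Prop :=
  ¬ D_suma_maximos_subarreglos arreglo resultado → out = suma_maximos_subarreglos_alt arreglo resultado
instance (arreglo : List Int) (resultado : Int) (out : Int) : Decidable (Spec_suma_maximos_subarreglos arreglo resultado out) := by
  unfold Spec_suma_maximos_subarreglos; infer_instance

def pvDiffWitness_suma_maximos_subarreglos : List Int × Int := ([5], 3)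
def pvDiffWitnessOut_suma_maximos_subarreglos : Int × Int := (5, 8)

-- ===== CLAIM (what is proved, stated in full; the proofs are below) =====
def Claim_unchanged_suma_maximos_subarreglos : Prop := ∀ (arreglo : List Int) (resultado : Int), Dom_suma_maximos_subarreglos arreglo resultado → Pre_suma_maximos_subarreglos arreglo resultado → Spec_suma_maximos_subarreglos arreglo resultado (suma_maximos_subarreglos arreglo resultado)
def Claim_changed_suma_maximos_subarreglos : Prop := Dom_suma_maximos_subarreglos (pvDiffWitness_suma_maximos_subarreglos.1) (pvDiffWitness_suma_maximos_subarreglos.2) ∧ Pre_suma_maximos_subarreglos (pvDiffWitness_suma_maximos_subarreglos.1) (pvDiffWitness_suma_maximos_subarreglos.2) ∧ D_suma_maximos_subarreglos (pvDiffWitness_suma_maximos_subarreglos.1) (pvDiffWitness_suma_maximos_subarreglos.2) ∧ suma_maximos_subarreglos (pvDiffWitness_suma_maximos_subarreglos.1) (pvDiffWitness_suma_maximos_subarreglos.2) = pvDiffWitnessOut_suma_maximos_subarreglos.1 ∧ suma_maximos_subarreglos_alt (pvDiffWitness_suma_maximos_subarreglos.1) (pvDiffWitness_suma_maximos_subarreglos.2)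 = pvDiffWitnessOut_suma_maximos_subarreglos.2 ∧ pvDiffWitnessOut_suma_maximos_subarreglos.1 ≠ pvDiffWitnessOut_suma_maximos_subarreglos.2
def Claim_exact_suma_maximos_subarreglos : Prop := ∀ (arreglo : List Int) (resultado : Int), Dom_suma_maximos_subarreglos arreglo resultado → Pre_suma_maximos_subarreglos arreglo resultado → D_suma_maximos_subarreglos arreglo resultado → suma_maximos_subarreglos arreglo resultado ≠ suma_maximos_subarreglos_alt arreglo resultado

-- ===== LEMMAS AND PROOFS =====

-- sum of running maxima (seed m) along xs: maths twin of pvRow's accumulator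
def pvRowS : Int → List Int → Int
  | _, [] => 0
  | m, x :: r => max m x + pvRowS (max m x) r

-- sum, over every nonempty suffix, of the running-max row sum: maths twin of pvGo
def pvT : List Int → Int
  | [] => 0
  | x :: r => (x + pvRowS x r) + pvT r

theorem pvRow_eq (m : Int) (xs : List Int) (t : Int) :
    pvRow m xs t = t + pvRowS m xs := by
  induction xs generalizing m t with
  | nil => simp [pvRow, pvRowS]
  | cons x r ih =>
      have hm : (if x > m then x else m) = max m x := by
        simp [max_def]; split_ifs <;> omega
      simp only [pvRow, pvRowS, hm, ih]; ring

theorem pvGo_eq (xs : List Int) (t : Int) : pvGo xs t = t + pvT xs := by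
  induction xs generalizing t with
  | nil => simp [pvGo, pvT]
  | cons x r ih =>
      simp only [pvGo, pvT, pvRow_eq, ih, pvRowS, max_self]
      ring

theorem alt_eq (xs : List Int) (r : Int) :
    suma_maximos_subarreglos_alt xs r = r + pvT xs := by
  simp [suma_maximos_subarreglos_alt, pvGo_eq]

-- rows where every element is ≤ the seed are constant
theorem pvRowS_const (m : Int) (v : List Int) (h : ∀ y ∈ v, y ≤ m) :
    pvRowS m v = m * v.length := by
  induction v with
  | nil => simp [pvRowS]
  | cons y v ih =>
      have hy : max m y = m := max_eq_left (h y (by simp))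
      simp only [pvRowS, hy, ih (fun z hz => h z (by simp [hz])), List.length_cons]
      push_cast; ring

theorem pvRowS_append (m : Int) (u w : List Int) :
    pvRowS m (u ++ w) = pvRowS m u + pvRowS (u.foldl max m) w := by
  induction u generalizing m with
  | nil => simp [pvRowS]
  | cons a u ih => simp only [List.cons_append, pvRowS, ih, List.foldl_cons]; ring

theorem pvRowS_split (m c : Int) (u v : List Int)
    (hu : ∀ y ∈ u, y ≤ c) (hv : ∀ y ∈ v, y ≤ c) (hm : m ≤ c) :
    pvRowS m (u ++ c :: v) = pvRowS m u + c * (v.length + 1) := by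
  have hfold : u.foldl max m ≤ c := by
    rcases PySem.List.foldl_max_mem u m with h | h
    · omega
    · exact hu _ h
  rw [pvRowS_append]
  simp only [pvRowS, max_eq_right hfold, pvRowS_const c v hv]
  ring

-- the split lemma: summing over suffixes across a global maximum c at position |u|
theorem pvT_split (c : Int) (u v : List Int)
    (hu : ∀ y ∈ u, y ≤ c) (hv : ∀ y ∈ v, y ≤ c) :
    pvT (u ++ c :: v) = pvT u + c * (u.length + 1) * (v.length + 1) + pvT v := by
  induction u with
  | nil =>
      simp only [List.nil_append, pvT, pvRowS_const c v hv, List.length_nil]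
      push_cast; ring
  | cons a u ih =>
      have ha : a ≤ c := hu a (by simp)
      have hu' : ∀ y ∈ u, y ≤ c := fun y hy => hu y (by simp [hy])
      simp only [List.cons_append, pvT, ih hu',
        pvRowS_split a c u v hu' hv ha, List.length_cons]
      push_cast; ring

-- A computes pvT; the accumulator is dropped exactly on singletons
theorem A_eq (xs : List Int) (hne : xs ≠ []) (r : Int) :
    suma_maximos_subarreglos xs r = if xs.length = 1 then pvT xs else r + pvT xs := by
  induction hn : xs.length using Nat.strong_induction_on generalizing xs r with
  | _ n ih =>
  subst hn
  rw [suma_maximos_subarreglos]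
  by_cases h1 : xs.length = 1
  · obtain ⟨a, rfl⟩ : ∃ a, xs = [a] := by
      match xs, h1 with | [a], _ => exact ⟨a, rfl⟩
    simp [PySem.List.pyGet?, PySem.List.pyIdx?, pvT, pvRowS, h1]
  · simp only [h1, if_false]
    split
    · next hmx => exact absurd (PySem.List.max?_eq_none_iff xs _ |>.mp hmx) hne
    next mx hmx =>
    split
    · next hpos =>
        exact absurd (PySem.List.max?_mem hmx)
          (PySem.List.index?_eq_none_iff xs mx |>.mp hpos)
    next p hpos =>
    obtain ⟨hk, hget, -⟩ := PySem.List.getElem_of_index?_eq_some hpos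
    have hmax : ∀ y ∈ xs, y ≤ mx := by
      intro y hy; exact PySem.List.max?_isMax hmx y hy
    have hxs : xs = xs.take p ++ mx :: xs.drop (p + 1) := by
      conv_lhs => rw [← List.take_append_drop p xs, List.drop_eq_getElem_cons hk, hget]
    have hu : ∀ y ∈ xs.take p, y ≤ mx := fun y hy => hmax y (List.mem_of_mem_take hy)
    have hv : ∀ y ∈ xs.drop (p + 1), y ≤ mx := fun y hy => hmax y (List.mem_of_mem_drop hy)
    have hlu : (xs.take p).length = p := by simp; omega
    have hlv : (xs.drop (p + 1)).length = xs.length - (p + 1) := by simp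
    have hT : pvT xs = pvT (xs.take p) + mx * (p + 1) * ((xs.length - (p + 1) : Nat) + 1) + pvT (xs.drop (p + 1)) := by
      conv_lhs => rw [hxs]
      rw [pvT_split mx _ _ hu hv, hlu, hlv]
    have hn2 : 2 ≤ xs.length := by
      rcases xs with _ | ⟨a, _ | ⟨b, t⟩⟩
      · exact absurd rfl hne
      · simp at h1
      · simp only [List.length_cons]; omega
    have hgetd : (PySem.List.pyGet? xs (p : Int)).getD 0 = mx := by
      rw [PySem.List.pyGet?_natCast, List.getElem?_eq_getElem hk, hget]; rfl
    have hslice_to : PySem.List.slice xs none (some (p : Int)) = xs.take p :=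
      PySem.List.slice_to_natCast xs p
    have hslice_from : PySem.List.slice xs (some ((p : Int) + 1)) none = xs.drop (p + 1) := by
      rw [show ((p : Int) + 1) = (((p + 1 : Nat)) : Int) by push_cast; ring,
          PySem.List.slice_from_natCast]
    -- recursive values: A on a nonempty sublist with accumulator 0 is pvT of it
    have ihT : ∀ ys : List Int, ys ≠ [] → ys.length < xs.length →
        suma_maximos_subarreglos ys 0 = pvT ys := by
      intro ys hys hlt
      rw [ih ys.length hlt ys hys 0 rfl]
      split <;> simp
    simp only [hgetd, hslice_to, hslice_from]
    have hc1 : ((xs.length - (p + 1) : Nat) : Int) = (xs.length : Int) - (p : Int) - 1 := by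
      omega
    rw [hc1] at hT
    split
    · next hp0 =>
        have hp : p = 0 := by exact_mod_cast hp0
        have hvne : xs.drop (p + 1) ≠ [] := by
          rw [← List.length_pos_iff, hlv]; omega
        rw [ihT _ hvne (by rw [hlv]; omega), hT]
        have htu : pvT (xs.take p) = 0 := by rw [hp]; simp [pvT]
        rw [htu, hp0]
        ring
    · next hp0 =>
        split
        · next hpfin =>
            have hune : xs.take p ≠ [] := by
              rw [← List.length_pos_iff, hlu]
              omega
            have hvnil : xs.drop (p + 1) = [] := List.drop_eq_nil_of_le (by omega)
            rw [ihT _ hune (by rw [hlu]; omega), hT, hvnil]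
            have htv : pvT ([] : List Int) = 0 := by simp [pvT]
            rw [htv, hpfin]
            ring
        · next hpfin =>
            have hune : xs.take p ≠ [] := by
              rw [← List.length_pos_iff, hlu]
              omega
            have hvne : xs.drop (p + 1) ≠ [] := by
              rw [← List.length_pos_iff, hlv]
              omega
            rw [ihT _ hune (by rw [hlu]; omega), ihT _ hvne (by rw [hlv]; omega), hT]
            ring

-- ===== VERDICT (by name: the statements are the Claim_ definitions above) =====
theorem suma_maximos_subarreglos_spec : Claim_unchanged_suma_maximos_subarreglos := by
  intro xs r _ hpre hnd
  rw [A_eq xs hpre r, alt_eq]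
  by_cases h1 : xs.length = 1
  · have hr : r = 0 := by
      by_contra hr
      exact hnd ⟨h1, hr⟩
    simp [h1, hr]
  · simp [h1]

theorem suma_maximos_subarreglos_changed : Claim_changed_suma_maximos_subarreglos := by
  unfold Claim_changed_suma_maximos_subarreglos
  refine ⟨by decide, by decide, by decide, ?_, by decide, by decide⟩
  rw [show pvDiffWitness_suma_maximos_subarreglos.1 = [(5 : Int)] from rfl,
      show pvDiffWitness_suma_maximos_subarreglos.2 = (3 : Int) from rfl,
      A_eq [(5 : Int)] (by simp) 3]
  simp [pvT, pvRowS, pvDiffWitnessOut_suma_maximos_subarreglos]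

theorem suma_maximos_subarreglos_tight : Claim_exact_suma_maximos_subarreglos := by
  intro xs r _ hpre hd
  obtain ⟨h1, hr⟩ := hd
  rw [A_eq xs hpre r, alt_eq]
  simp [h1]
  omega
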